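-- pv_equiv track=rewrite | github.com/grambank/pygrambank | src/pygrambank/commands/remove_empty.py | real_table_height
-- ===== SOURCE A (Python) =====
-- def real_table_height(table):
--     """Return height of a table ignoring any empty rows at the end."""
--     last_index = None
--     for index, row in enumerate(table):
--         if any(c.strip() for c in row):
--             last_index = index
--     if last_index is None:  # pragma: nocover
--         return 0
--     else:
--         return last_index + 1
-- ===== SOURCE B (Python) =====
-- def real_table_height(table):
--     """Return height of a table ignoring any empty rows at the end."""
--     rows = list(table)
--     for i in range(len(rows) - 1, -1, -1):
--         if any(c.strip() for c in rows[i]):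
--             return i + 1
--     return 0
-- ===== Notes on version B (the rewrite author's own statement) =====
-- stated objective: alternative
-- what changed: B scans rows backward from the end and returns at the first non-empty row (early exit), instead of A's forward scan tracking the last non-empty index.
import Mathlib
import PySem

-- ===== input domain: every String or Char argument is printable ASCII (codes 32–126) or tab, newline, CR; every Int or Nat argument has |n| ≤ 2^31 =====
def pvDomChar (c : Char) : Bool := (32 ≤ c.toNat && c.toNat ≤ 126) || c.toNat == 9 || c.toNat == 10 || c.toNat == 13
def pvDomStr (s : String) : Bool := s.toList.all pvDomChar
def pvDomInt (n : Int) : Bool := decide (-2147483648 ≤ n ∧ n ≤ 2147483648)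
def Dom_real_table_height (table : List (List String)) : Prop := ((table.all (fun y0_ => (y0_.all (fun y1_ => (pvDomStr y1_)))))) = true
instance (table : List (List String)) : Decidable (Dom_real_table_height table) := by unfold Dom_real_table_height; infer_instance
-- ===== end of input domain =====

-- B scans rows backward with early exit instead of A's forward scan tracking the last non-empty index (objective: alternative).

-- ===== PORT A =====
def pvNonempty (row : List String) : Bool :=
  row.any (fun c => !(PySem.Str.strip c == ""))

def real_table_height (table : List (List String)) : Int :=
  let last_index : Option Int :=
    (PySem.List.enumerate table).foldl
      (fun acc p => if pvNonempty p.2 then some p.1 else acc) none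
  match last_index with
  | none => 0
  | some i => i + 1

-- ===== PORT B =====
-- backward index scan i = len-1 .. 0, realised as structural recursion on the reversed list
def pvGoBack (rev : List (List String)) : Int :=
  match rev with
  | [] => 0
  | r :: rest => if pvNonempty r then (rest.length : Int) + 1 else pvGoBack rest

def real_table_height_alt (table : List (List String)) : Int :=
  pvGoBack table.reverse

-- ===== PRECONDITION & SPEC =====
def Spec_real_table_height (table : List (List String)) (out : Int) : Prop := out = real_table_height_alt table
instance (table : List (List String)) (out : Int) : Decidable (Spec_real_table_height table out) := by unfold Spec_real_table_height; infer_instance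

-- ===== CLAIM =====
def Claim_equal_real_table_height : Prop := ∀ (table : List (List String)), Dom_real_table_height table → Spec_real_table_height table (real_table_height table)

-- ===== LEMMAS AND PROOFS =====
theorem pvA_concat (xs : List (List String)) (x : List String) :
    real_table_height (xs ++ [x]) =
      if pvNonempty x then (xs.length : Int) + 1 else real_table_height xs := by
  unfold real_table_height
  rw [PySem.List.enumerate_append, List.foldl_append]
  simp only [PySem.List.enumerate, List.foldl_cons, List.foldl_nil]
  by_cases h : pvNonempty x = true
  · simp [h]
  · simp [h]

theorem pvEq (table : List (List String)) :
    real_table_height table = real_table_height_alt table := by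
  induction table using List.reverseRecOn with
  | nil => rfl
  | append_singleton xs x ih =>
      rw [pvA_concat]
      unfold real_table_height_alt
      rw [List.reverse_append]
      simp only [List.reverse_cons, List.reverse_nil, List.nil_append, List.singleton_append, pvGoBack]
      by_cases h : pvNonempty x = true
      · simp [h]
      · simp [h]; exact ih

-- ===== VERDICT =====
theorem real_table_height_spec : Claim_equal_real_table_height := by
  intro table _
  unfold Spec_real_table_height
  exact pvEq table
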